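-- pv_equiv track=rewrite | github.com/RCOSDP/weko | modules/weko-items-autofill/weko_items_autofill/utils.py | pack_data_with_multiple_type_cinii
-- ===== SOURCE A (Python) =====
-- def pack_data_with_multiple_type_cinii(data, type1, type2):
--     """Map CiNii multi data with type.
--
--     Arguments:
--         data1
--         type1
--         data2
--         type2
--
--     Returns:
--         packed data
--
--     """
--     result = list()
--     _data = {item["@type"]:item["@value"] for item in data}
--     if type1 in _data:
--         new_data = dict()
--         new_data['@value'] = _data[type1]
--         new_data['@type'] = type1
--         result.append(new_data)
--     if type2 in _data:
--         new_data = dict()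
--         new_data['@value'] = _data[type2]
--         new_data['@type'] = type2
--         result.append(new_data)
--     return result
-- ===== SOURCE B (Python) =====
-- def pack_data_with_multiple_type_cinii(data, type1, type2):
--     """Two staged backward scans: the last occurrence of each type is the first
--     match when walking the data in reverse, so each scan stops early."""
--     def last_entry(t):
--         for item in reversed(data):
--             if item["@type"] == t:
--                 return [{'@value': item["@value"], '@type': t}]
--         return []
--     return last_entry(type1) + last_entry(type2)
-- ===== Notes on version B (the rewrite author's own statement) =====
-- stated objective: alternative
-- what changed: Replaces the forward dict-comprehension (last-wins overwrite, then two membership lookups) by two staged backward scans that stop at the first match in reverse order, building each output entry directly with no intermediate dict.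
import Mathlib
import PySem

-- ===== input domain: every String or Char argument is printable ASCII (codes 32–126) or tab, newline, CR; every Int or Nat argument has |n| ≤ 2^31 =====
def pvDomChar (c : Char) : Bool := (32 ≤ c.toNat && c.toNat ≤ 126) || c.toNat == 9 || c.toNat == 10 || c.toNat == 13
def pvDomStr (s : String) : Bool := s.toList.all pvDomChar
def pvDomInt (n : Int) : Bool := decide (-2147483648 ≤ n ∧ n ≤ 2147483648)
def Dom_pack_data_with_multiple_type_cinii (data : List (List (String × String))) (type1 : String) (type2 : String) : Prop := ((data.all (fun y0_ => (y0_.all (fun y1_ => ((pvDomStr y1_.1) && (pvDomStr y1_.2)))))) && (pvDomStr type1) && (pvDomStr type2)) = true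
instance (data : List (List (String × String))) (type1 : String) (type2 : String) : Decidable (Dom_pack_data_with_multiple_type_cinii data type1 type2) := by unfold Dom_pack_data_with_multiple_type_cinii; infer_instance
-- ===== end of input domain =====

-- B replaces A's forward dict-comprehension (last-wins) + two membership lookups by two
-- staged backward scans that return at the first match in reverse; objective: alternative.
-- ===== PORT A =====
-- item[k] on an input dict (assoc list, first-match lookup); total via getD "", Pre_ guarantees the key is present
def pvItemGet (item : List (String × String)) (k : String) : String := (item.lookup k).getD ""

def pack_data_with_multiple_type_cinii (data : List (List (String × String))) (type1 : String) (type2 : String) : List (List (String × String)) :=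
  let _data : PySem.Dict String String :=
    data.foldl (fun d item => d.insert (pvItemGet item "@type") (pvItemGet item "@value")) PySem.Dict.empty
  let r1 : List (List (String × String)) :=
    if _data.contains type1 then [[("@value", _data.getD type1 ""), ("@type", type1)]] else []
  let r2 : List (List (String × String)) :=
    if _data.contains type2 then [[("@value", _data.getD type2 ""), ("@type", type2)]] else []
  r1 ++ r2

-- ===== PORT B =====
-- Source B's 'for item in reversed(data): if match, return' loop, as structural recursion on the reversed list
def pvLastEntryRev (rev : List (List (String × String))) (t : String) : List (List (String × String)) :=
  match rev with
  | [] => []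
  | item :: rest =>
    if pvItemGet item "@type" == t then [[("@value", pvItemGet item "@value"), ("@type", t)]]
    else pvLastEntryRev rest t

def pack_data_with_multiple_type_cinii_alt (data : List (List (String × String))) (type1 : String) (type2 : String) : List (List (String × String)) :=
  pvLastEntryRev data.reverse type1 ++ pvLastEntryRev data.reverse type2

-- ===== PRECONDITION & SPEC =====
-- A raises KeyError when some item lacks the "@type" or "@value" key; exactly those inputs are excluded.
def Pre_pack_data_with_multiple_type_cinii (data : List (List (String × String))) (type1 : String) (type2 : String) : Prop :=
  ∀ item ∈ data, (item.lookup "@type").isSome ∧ (item.lookup "@value").isSome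
instance (data : List (List (String × String))) (type1 : String) (type2 : String) : Decidable (Pre_pack_data_with_multiple_type_cinii data type1 type2) := by unfold Pre_pack_data_with_multiple_type_cinii; infer_instance
def pvWitness_pack_data_with_multiple_type_cinii : (List (List (String × String))) × String × String :=
  ([[("@type", "a"), ("@value", "x")], [("@type", "b"), ("@value", "y")]], "a", "b")

def Spec_pack_data_with_multiple_type_cinii (data : List (List (String × String))) (type1 : String) (type2 : String) (out : List (List (String × String))) : Prop := out = pack_data_with_multiple_type_cinii_alt data type1 type2
instance (data : List (List (String × String))) (type1 : String) (type2 : String) (out : List (List (String × String))) : Decidable (Spec_pack_data_with_multiple_type_cinii data type1 type2 out) := by unfold Spec_pack_data_with_multiple_type_cinii; infer_instance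

-- ===== CLAIM (what is proved, stated in full; the proofs are below) =====
def Claim_equal_pack_data_with_multiple_type_cinii : Prop := ∀ (data : List (List (String × String))) (type1 : String) (type2 : String), Dom_pack_data_with_multiple_type_cinii data type1 type2 → Pre_pack_data_with_multiple_type_cinii data type1 type2 → Spec_pack_data_with_multiple_type_cinii data type1 type2 (pack_data_with_multiple_type_cinii data type1 type2)

-- ===== LEMMAS AND PROOFS =====

-- first match in a list, as an Option (characterises B's early-exit scan)
def pvScan (l : List (List (String × String))) (t : String) : Option String :=
  match l with
  | [] => none
  | item :: rest => if pvItemGet item "@type" == t then some (pvItemGet item "@value") else pvScan rest t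

theorem pvLastEntryRev_eq_scan (l : List (List (String × String))) (t : String) :
    pvLastEntryRev l t = match pvScan l t with
      | some v => [[("@value", v), ("@type", t)]]
      | none => [] := by
  induction l with
  | nil => rfl
  | cons item rest ih =>
    simp only [pvLastEntryRev, pvScan]
    by_cases h : pvItemGet item "@type" == t <;> simp [h, ih]

theorem pvScan_append (l1 l2 : List (List (String × String))) (t : String) :
    pvScan (l1 ++ l2) t = match pvScan l1 t with
      | some v => some v
      | none => pvScan l2 t := by
  induction l1 with
  | nil => rfl
  | cons item rest ih =>
    simp only [List.cons_append, pvScan]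
    by_cases h : pvItemGet item "@type" == t <;> simp [h, ih]

-- the value at key k after A's insert loop, expressed as a left fold over the data
theorem pv_get?_foldA (data : List (List (String × String))) (d : PySem.Dict String String) (k : String) :
    (data.foldl (fun d item => d.insert (pvItemGet item "@type") (pvItemGet item "@value")) d).get? k
      = data.foldl (fun s item => if pvItemGet item "@type" == k then some (pvItemGet item "@value") else s) (d.get? k) := by
  induction data generalizing d with
  | nil => rfl
  | cons item rest ih =>
    simp only [List.foldl]
    rw [ih]
    congr 1
    rw [PySem.Dict.get?_insert]
    by_cases h : pvItemGet item "@type" = k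
    · simp [h]
    · simp [h, Ne.symm h]

-- A's last-wins fold equals the first match on the reversed list
theorem pv_foldA_eq_scan_reverse (data : List (List (String × String))) (k : String) (o : Option String) :
    data.foldl (fun s item => if pvItemGet item "@type" == k then some (pvItemGet item "@value") else s) o
      = match pvScan data.reverse k with
        | some v => some v
        | none => o := by
  induction data generalizing o with
  | nil => rfl
  | cons item rest ih =>
    simp only [List.foldl, List.reverse_cons]
    rw [ih, pvScan_append]
    cases h : pvScan rest.reverse k with
    | some v => rfl
    | none =>
      simp only [pvScan]
      by_cases hm : pvItemGet item "@type" == k <;> simp [hm]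

-- ===== VERDICT (by name: the statement is the Claim_ definition above) =====
theorem pack_data_with_multiple_type_cinii_spec : Claim_equal_pack_data_with_multiple_type_cinii := by
  intro data type1 type2 _ _
  show pack_data_with_multiple_type_cinii data type1 type2 = pack_data_with_multiple_type_cinii_alt data type1 type2
  unfold pack_data_with_multiple_type_cinii pack_data_with_multiple_type_cinii_alt
  dsimp only
  congr 1
  · rw [pvLastEntryRev_eq_scan, PySem.Dict.contains_eq_isSome_get?, PySem.Dict.getD_eq_get?_getD,
        pv_get?_foldA, pv_foldA_eq_scan_reverse]
    simp only [PySem.Dict.get?_empty]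
    cases pvScan data.reverse type1 with
    | none => rfl
    | some v => rfl
  · rw [pvLastEntryRev_eq_scan, PySem.Dict.contains_eq_isSome_get?, PySem.Dict.getD_eq_get?_getD,
        pv_get?_foldA, pv_foldA_eq_scan_reverse]
    simp only [PySem.Dict.get?_empty]
    cases pvScan data.reverse type2 with
    | none => rfl
    | some v => rfl
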